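-- pv_equiv track=rewrite | github.com/daniel-reich/ubiquitous-fiesta | zeuvB4YRvu47w8e8f_0.py | full_cycle
-- ===== SOURCE A (Python) =====
-- def full_cycle(lst):
--     len_lst = len(lst)
--     not_visit = [True] * len_lst
--     idx = lst[0]
--     while any(not_visit):
--         if -1 < idx < len_lst and not_visit[idx]:
--             not_visit[idx] = False
--             idx = lst[idx]
--         else:
--             return False
--     return True
-- ===== SOURCE B (Python) =====
-- def full_cycle(lst):
--     n = len(lst)
--     seen = [False] * n
--     for x in lst:
--         if not (0 <= x < n) or seen[x]:
--             return False
--         seen[x] = True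
--     j = lst[0]
--     count = 1
--     while j != 0:
--         j = lst[j]
--         count += 1
--     return count == n
-- ===== Notes on version B (the rewrite author's own statement) =====
-- stated objective: alternative
-- what changed: A's single interleaved chain-walk (mark-as-you-go with a not_visit array, starting from the pointer stored at index 0) is replaced by a two-pass decomposition: first a validation pass proving the list is a permutation of its index range via a seen array, then a separate cycle-length count following pointers from index 0, returning whether that cycle has full length.
import Mathlib
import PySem

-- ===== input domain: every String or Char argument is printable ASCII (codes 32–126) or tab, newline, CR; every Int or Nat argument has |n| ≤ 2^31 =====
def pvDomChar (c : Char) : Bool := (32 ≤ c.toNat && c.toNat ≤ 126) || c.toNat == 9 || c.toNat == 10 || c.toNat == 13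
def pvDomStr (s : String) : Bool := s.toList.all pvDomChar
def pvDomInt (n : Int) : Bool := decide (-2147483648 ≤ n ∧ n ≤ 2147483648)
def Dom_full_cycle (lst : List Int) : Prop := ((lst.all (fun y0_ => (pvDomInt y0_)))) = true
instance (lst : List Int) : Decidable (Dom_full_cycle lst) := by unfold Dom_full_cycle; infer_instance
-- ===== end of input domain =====

-- B replaces A's single interleaved chain-walk by a permutation-validation pass followed by a
-- separate cycle-length count from index 0 (objective: alternative decomposition, same cost).

-- ===== PORT A =====
-- A's while loop; fuel `lst.length + 1` strictly exceeds the number of iterations (each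
-- iteration either returns or turns one `true` entry of `nv` to `false`), so the base case
-- is never reached on the calls `full_cycle` makes.
def fcLoopA (lst : List Int) (nv : List Bool) (idx : Int) : Nat → Bool
  | 0 => false
  | fuel+1 =>
    if nv.any id then
      if (decide (-1 < idx) && decide (idx < (lst.length : Int))) && nv.getD idx.toNat false then
        fcLoopA lst (nv.set idx.toNat false) ((PySem.List.pyGet? lst idx).getD 0) fuel
      else false
    else true

def full_cycle (lst : List Int) : Bool :=
  match PySem.List.pyGet? lst 0 with    -- idx = lst[0]; none = IndexError, excluded by Pre_
  | none => false
  | some idx => fcLoopA lst (List.replicate lst.length true) idx (lst.length + 1)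

-- ===== PORT B =====
-- B's validation loop: `none` = B's `return False` inside the for loop.
def fcValid (n : Nat) (seen : List Bool) : List Int → Option (List Bool)
  | [] => some seen
  | x :: xs =>
    if (decide (0 ≤ x) && decide (x < (n : Int))) && !(seen.getD x.toNat false) then
      fcValid n (seen.set x.toNat true) xs
    else none

-- B's while loop; fuel `lst.length` exceeds the number of iterations whenever the walk is
-- reached (lst is then a permutation, whose 0-cycle has length ≤ lst.length).
def fcWalk (lst : List Int) (j : Int) (count : Nat) : Nat → Nat
  | 0 => count
  | fuel+1 => if j == 0 then count else fcWalk lst ((PySem.List.pyGet? lst j).getD 0) (count + 1) fuel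

def full_cycle_alt (lst : List Int) : Bool :=
  match fcValid lst.length (List.replicate lst.length false) lst with
  | none => false
  | some _ =>
    match PySem.List.pyGet? lst 0 with    -- j = lst[0]; none = IndexError, excluded by Pre_
    | none => false
    | some j => fcWalk lst j 1 lst.length == lst.length

-- ===== PRECONDITION & SPEC =====
-- Pre_ excludes only the empty list, on which A raises IndexError reading the first element (B raises there too).
def Pre_full_cycle (lst : List Int) : Prop := lst ≠ []
instance (lst : List Int) : Decidable (Pre_full_cycle lst) := by unfold Pre_full_cycle; infer_instance
def pvWitness_full_cycle : List Int := [1, 2, 0]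

def Spec_full_cycle (lst : List Int) (out : Bool) : Prop := out = full_cycle_alt lst
instance (lst : List Int) (out : Bool) : Decidable (Spec_full_cycle lst out) := by unfold Spec_full_cycle; infer_instance

-- ===== CLAIM (what is proved, stated in full; the proofs are below) =====
def Claim_equal_full_cycle : Prop := ∀ (lst : List Int), Dom_full_cycle lst → Pre_full_cycle lst → Spec_full_cycle lst (full_cycle lst)

-- ===== LEMMAS AND PROOFS =====

-- The iterated pointer map: fcChain lst j k = the value reached from j after k steps of `j = lst[j]`.
def fcStep (lst : List Int) (j : Int) : Int := (PySem.List.pyGet? lst j).getD 0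

def fcChain (lst : List Int) (j : Int) : Nat → Int
  | 0 => j
  | k+1 => fcStep lst (fcChain lst j k)

def fcInR (lst : List Int) (j : Int) : Prop := 0 ≤ j ∧ j < lst.length

-- A's loop unrolled as a Prop, one conjunct per iteration.
def ACov (lst : List Int) (nv : List Bool) (idx : Int) : Nat → Prop
  | 0 => True
  | m+1 => (fcInR lst idx ∧ nv.getD idx.toNat false = true) ∧
      ACov lst (nv.set idx.toNat false) (fcStep lst idx) m

theorem fcChain_succ_front (lst : List Int) (j : Int) (k : Nat) :
    fcChain lst j (k+1) = fcChain lst (fcStep lst j) k := by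
  induction k with
  | zero => rfl
  | succ k ih =>
    have h := congrArg (fcStep lst) ih
    simpa [fcChain] using h

theorem fcStep_eq (lst : List Int) (j : Int) (h : fcInR lst j) :
    fcStep lst j = lst.getD j.toNat 0 := by
  obtain ⟨h1, h2⟩ := h
  rw [fcStep, PySem.List.pyGet?_of_nonneg (h := h1)]
  simp [List.getD]

theorem count_true_set_false : ∀ (nv : List Bool) (i : Nat),
    nv.getD i false = true → (nv.set i false).count true + 1 = nv.count true := by
  intro nv
  induction nv with
  | nil => intro i h; simp [List.getD] at h
  | cons b t ih =>
    intro i h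
    cases i with
    | zero => simp [List.getD] at h; subst h; simp
    | succ i =>
      simp only [List.getD, List.getElem?_cons_succ] at h
      simp only [List.set, List.count_cons]
      rw [← ih i h]
      omega

theorem getD_true_lt (nv : List Bool) (i : Nat) (h : nv.getD i false = true) : i < nv.length := by
  by_contra hc
  rw [List.getD_eq_default _ _ (by omega)] at h
  exact Bool.false_ne_true h

theorem any_eq_false_of_count (nv : List Bool) (h : nv.count true = 0) : nv.any id = false := by
  rw [List.any_eq_false]
  intro x hx
  have hnot : true ∉ nv := List.count_eq_zero.mp h
  cases x
  · simp
  · exact absurd hx hnot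

theorem any_eq_true_of_count (nv : List Bool) (m : Nat) (h : nv.count true = m + 1) : nv.any id = true := by
  rw [List.any_eq_true]
  exact ⟨true, List.count_pos_iff.mp (by omega), rfl⟩

-- A-characterization: with exact fuel, A's loop succeeds iff ACov holds.
theorem fcLoopA_iff_ACov (lst : List Int) : ∀ (m : Nat) (nv : List Bool) (idx : Int),
    nv.count true = m →
    (fcLoopA lst nv idx (m+1) = true ↔ ACov lst nv idx m) := by
  intro m
  induction m with
  | zero =>
    intro nv idx h
    rw [fcLoopA, any_eq_false_of_count nv h]
    simp [ACov]
  | succ m ih =>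
    intro nv idx h
    rw [fcLoopA, any_eq_true_of_count nv m h]
    simp only [if_true]
    by_cases hg : fcInR lst idx ∧ nv.getD idx.toNat false = true
    · have hb : ((decide (-1 < idx) && decide (idx < (lst.length : Int))) && nv.getD idx.toNat false) = true := by
        obtain ⟨⟨h1, h2⟩, h3⟩ := hg
        simp only [Bool.and_eq_true, decide_eq_true_eq]
        exact ⟨⟨by omega, h2⟩, h3⟩
      rw [hb]
      simp only [if_true]
      have hc : (nv.set idx.toNat false).count true = m := by
        have := count_true_set_false nv idx.toNat hg.2
        omega
      rw [ih _ _ hc]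
      show ACov lst (nv.set idx.toNat false) (fcStep lst idx) m ↔ ACov lst nv idx (m+1)
      simp only [ACov]
      tauto
    · have hb : ((decide (-1 < idx) && decide (idx < (lst.length : Int))) && nv.getD idx.toNat false) = false := by
        by_contra hc
        rw [Bool.not_eq_false] at hc
        simp only [Bool.and_eq_true, decide_eq_true_eq] at hc
        exact hg ⟨⟨by omega, hc.1.2⟩, hc.2⟩
      rw [hb]
      simp only [ACov]
      constructor
      · intro hfalse; exact absurd hfalse (by simp)
      · intro ⟨h1, _⟩; exact absurd h1 hg

-- getD-after-set on Bool lists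
theorem getD_set_bool (l : List Bool) (i j : Nat) (b : Bool) :
    (l.set i b).getD j false = if i = j ∧ i < l.length then b else l.getD j false := by
  simp only [List.getD_eq_getElem?_getD, List.getElem?_set]
  split_ifs with h1 h2 h3
  all_goals simp_all
  all_goals omega

-- ACov ⇒ chain facts.
theorem ACov_spec (lst : List Int) : ∀ (m : Nat) (nv : List Bool) (idx : Int),
    ACov lst nv idx m →
    ∀ k, k < m → fcInR lst (fcChain lst idx k) ∧
      nv.getD (fcChain lst idx k).toNat false = true ∧
      ∀ j, j < k → fcChain lst idx j ≠ fcChain lst idx k := by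
  intro m
  induction m with
  | zero => intro nv idx _ k hk; omega
  | succ m ih =>
    intro nv idx hcov k hk
    obtain ⟨⟨hin, hnv⟩, htail⟩ := hcov
    have hlt : idx.toNat < nv.length := getD_true_lt nv idx.toNat hnv
    cases k with
    | zero => exact ⟨hin, hnv, by omega⟩
    | succ k =>
      have hrw : ∀ t, fcChain lst idx (t+1) = fcChain lst (fcStep lst idx) t :=
        fun t => fcChain_succ_front lst idx t
      obtain ⟨hin', hnv', hne'⟩ := ih (nv.set idx.toNat false) (fcStep lst idx) htail k (by omega)
      rw [getD_set_bool] at hnv'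
      have hcond : ¬(idx.toNat = (fcChain lst (fcStep lst idx) k).toNat ∧ idx.toNat < nv.length) := by
        intro hc
        rw [if_pos hc] at hnv'
        exact absurd hnv' (by simp)
      rw [if_neg hcond] at hnv'
      have hxne : fcChain lst (fcStep lst idx) k ≠ idx := by
        intro he
        exact hcond ⟨by rw [he], hlt⟩
      refine ⟨by rw [hrw]; exact hin', by rw [hrw]; exact hnv', ?_⟩
      intro j hj
      cases j with
      | zero =>
        rw [hrw]
        exact fun he => hxne he.symm
      | succ j =>
        rw [hrw, hrw]
        exact hne' j (by omega)

-- Chain facts ⇒ ACov.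
theorem ACov_intro (lst : List Int) : ∀ (m : Nat) (nv : List Bool) (idx : Int),
    (∀ k, k < m → fcInR lst (fcChain lst idx k) ∧
      nv.getD (fcChain lst idx k).toNat false = true ∧
      ∀ j, j < k → fcChain lst idx j ≠ fcChain lst idx k) →
    ACov lst nv idx m := by
  intro m
  induction m with
  | zero => intro nv idx _; trivial
  | succ m ih =>
    intro nv idx h
    obtain ⟨hin, hnv, -⟩ := h 0 (by omega)
    have hlt : idx.toNat < nv.length := getD_true_lt nv idx.toNat hnv
    refine ⟨⟨hin, hnv⟩, ih _ _ ?_⟩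
    intro k hk
    have hrw : ∀ t, fcChain lst idx (t+1) = fcChain lst (fcStep lst idx) t :=
      fun t => fcChain_succ_front lst idx t
    obtain ⟨hin', hnv', hne'⟩ := h (k+1) (by omega)
    rw [hrw] at hin' hnv'
    have hne0 : fcChain lst (fcStep lst idx) k ≠ idx := by
      intro he
      have := hne' 0 (by omega)
      rw [hrw] at this
      exact this he.symm
    refine ⟨hin', ?_, ?_⟩
    · rw [getD_set_bool]
      split_ifs with hcase
      · exfalso
        apply hne0
        have h0 : (0:Int) ≤ idx := hin.1
        have h1 : (0:Int) ≤ fcChain lst (fcStep lst idx) k := hin'.1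
        omega
      · exact hnv'
    · intro j hj
      have := hne' (j+1) (by omega)
      rw [hrw, hrw] at this
      exact this

-- fcValid characterization.
theorem fcValid_iff (n : Nat) : ∀ (xs : List Int) (seen : List Bool), seen.length = n →
    (fcValid n seen xs ≠ none ↔
      xs.Nodup ∧ ∀ x ∈ xs, 0 ≤ x ∧ x < (n : Int) ∧ seen.getD x.toNat false = false) := by
  intro xs
  induction xs with
  | nil => intro seen _; simp [fcValid]
  | cons x xs ih =>
    intro seen hlen
    rw [fcValid]
    by_cases hg : 0 ≤ x ∧ x < (n : Int) ∧ seen.getD x.toNat false = false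
    · obtain ⟨hg1, hg2, hg3⟩ := hg
      have hxlt : x.toNat < seen.length := by omega
      have hb : ((decide (0 ≤ x) && decide (x < (n : Int))) && !(seen.getD x.toNat false)) = true := by
        rw [hg3]
        simp [hg1, hg2]
      rw [hb]
      simp only [if_true]
      have hlen' : (seen.set x.toNat true).length = n := by simp [hlen]
      rw [ih _ hlen']
      constructor
      · rintro ⟨hnd, hall⟩
        have hxnot : x ∉ xs := by
          intro hx
          have h3 := (hall x hx).2.2
          rw [getD_set_bool, if_pos ⟨rfl, hxlt⟩] at h3
          exact absurd h3 (by simp)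
        refine ⟨List.nodup_cons.mpr ⟨hxnot, hnd⟩, ?_⟩
        intro y hy
        rcases List.mem_cons.mp hy with rfl | hy'
        · exact ⟨hg1, hg2, hg3⟩
        · obtain ⟨hy1, hy2, hy3⟩ := hall y hy'
          rw [getD_set_bool] at hy3
          have hc : ¬(x.toNat = y.toNat ∧ x.toNat < seen.length) := by
            intro hc
            rw [if_pos hc] at hy3
            exact absurd hy3 (by simp)
          rw [if_neg hc] at hy3
          exact ⟨hy1, hy2, hy3⟩
      · rintro ⟨hnd, hall⟩
        obtain ⟨hxnot, hnd'⟩ := List.nodup_cons.mp hnd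
        refine ⟨hnd', ?_⟩
        intro y hy
        obtain ⟨hy1, hy2, hy3⟩ := hall y (List.mem_cons_of_mem _ hy)
        refine ⟨hy1, hy2, ?_⟩
        rw [getD_set_bool, if_neg]
        · exact hy3
        · rintro ⟨hc, -⟩
          have hxy : x = y := by omega
          exact hxnot (hxy ▸ hy)
    · have hb : ((decide (0 ≤ x) && decide (x < (n : Int))) && !(seen.getD x.toNat false)) = false := by
        by_contra hc
        rw [Bool.not_eq_false] at hc
        simp only [Bool.and_eq_true, decide_eq_true_eq, Bool.not_eq_true'] at hc
        exact hg ⟨hc.1.1, hc.1.2, hc.2⟩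
      rw [hb, if_neg (by simp)]
      constructor
      · intro hno
        exact absurd rfl hno
      · rintro ⟨-, hall⟩
        exact absurd (hall x (List.mem_cons_self)) hg

theorem pyGet0_eq (lst : List Int) (h : lst ≠ []) :
    PySem.List.pyGet? lst 0 = some (fcStep lst 0) := by
  have hl : 0 < lst.length := List.length_pos_iff.mpr h
  rw [fcStep, PySem.List.pyGet?_zero, List.getElem?_eq_getElem hl]
  rfl

theorem A_iff (lst : List Int) (h : lst ≠ []) :
    (full_cycle lst = true ↔
      ACov lst (List.replicate lst.length true) (fcStep lst 0) lst.length) := by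
  unfold full_cycle
  rw [pyGet0_eq lst h]
  exact fcLoopA_iff_ACov lst lst.length _ _ (by simp)

theorem getD_replicate_false (n : Nat) (i : Nat) :
    (List.replicate n false).getD i false = false := by
  rcases lt_or_ge i n with hlt | hge
  · rw [List.getD_eq_getElem _ _ (by simpa using hlt)]
    simp
  · rw [List.getD_eq_default _ _ (by simpa using hge)]

theorem getD_replicate_true (n : Nat) (i : Nat) (h : i < n) :
    (List.replicate n true).getD i false = true := by
  rw [List.getD_eq_getElem _ _ (by simpa using h)]
  simp

theorem B_iff (lst : List Int) (h : lst ≠ []) :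
    (full_cycle_alt lst = true ↔
      (lst.Nodup ∧ ∀ x ∈ lst, 0 ≤ x ∧ x < (lst.length : Int)) ∧
        fcWalk lst (fcStep lst 0) 1 lst.length = lst.length) := by
  unfold full_cycle_alt
  have hchar := fcValid_iff lst.length lst (List.replicate lst.length false) (by simp)
  cases hv : fcValid lst.length (List.replicate lst.length false) lst with
  | none =>
    constructor
    · intro hfalse
      cases hfalse
    · rintro ⟨⟨hnd, hall⟩, -⟩
      have hne : fcValid lst.length (List.replicate lst.length false) lst ≠ none :=
        hchar.mpr ⟨hnd, fun x hx => ⟨(hall x hx).1, (hall x hx).2, getD_replicate_false _ _⟩⟩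
      exact absurd hv hne
  | some r =>
    rw [pyGet0_eq lst h]
    have hfacts := hchar.mp (by rw [hv]; simp)
    show (fcWalk lst (fcStep lst 0) 1 lst.length == lst.length) = true ↔ _
    rw [beq_iff_eq]
    constructor
    · intro hw
      exact ⟨⟨hfacts.1, fun x hx => ⟨(hfacts.2 x hx).1, (hfacts.2 x hx).2.1⟩⟩, hw⟩
    · rintro ⟨-, hw⟩
      exact hw

-- injectivity of the chain from H2-style pairwise distinctness
theorem chain_inj_of_pairwise (lst : List Int) (i0 : Int)
    (H2 : ∀ j k, j < k → k < lst.length → fcChain lst i0 j ≠ fcChain lst i0 k) :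
    ∀ a b, a < lst.length → b < lst.length → fcChain lst i0 a = fcChain lst i0 b → a = b := by
  intro a b ha hb he
  rcases lt_trichotomy a b with hlt | heq | hgt
  · exact absurd he (H2 a b hlt hb)
  · exact heq
  · exact absurd he.symm (H2 b a hgt ha)

-- ===== A ⇒ B =====
theorem dirAB_surj (lst : List Int)
    (H1 : ∀ k, k < lst.length → fcInR lst (fcChain lst (fcStep lst 0) k))
    (H2 : ∀ j k, j < k → k < lst.length →
      fcChain lst (fcStep lst 0) j ≠ fcChain lst (fcStep lst 0) k) :
    ∀ i, i < lst.length → ∃ k, k < lst.length ∧ (fcChain lst (fcStep lst 0) k).toNat = i := by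
  intro i hi
  have hpos : 0 < lst.length := by omega
  haveI : NeZero lst.length := ⟨by omega⟩
  let g : Fin lst.length → Fin lst.length := fun k =>
    ⟨(fcChain lst (fcStep lst 0) k.1).toNat, by
      have := H1 k.1 k.2
      obtain ⟨h1, h2⟩ := this
      omega⟩
  have ginj : Function.Injective g := by
    intro a b hab
    have hval : (fcChain lst (fcStep lst 0) a.1).toNat = (fcChain lst (fcStep lst 0) b.1).toNat :=
      congrArg Fin.val hab
    have ha0 := (H1 a.1 a.2).1
    have hb0 := (H1 b.1 b.2).1
    have : fcChain lst (fcStep lst 0) a.1 = fcChain lst (fcStep lst 0) b.1 := by omega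
    exact Fin.ext (chain_inj_of_pairwise lst _ H2 a.1 b.1 a.2 b.2 this)
  have gsurj : Function.Surjective g := Finite.surjective_of_injective ginj
  obtain ⟨k, hk⟩ := gsurj ⟨i, hi⟩
  exact ⟨k.1, k.2, congrArg Fin.val hk⟩

theorem dirAB_zero (lst : List Int) (hpos : 0 < lst.length)
    (H1 : ∀ k, k < lst.length → fcInR lst (fcChain lst (fcStep lst 0) k))
    (H2 : ∀ j k, j < k → k < lst.length →
      fcChain lst (fcStep lst 0) j ≠ fcChain lst (fcStep lst 0) k) :
    fcChain lst (fcStep lst 0) (lst.length - 1) = 0 := by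
  obtain ⟨k, hk, hk0⟩ := dirAB_surj lst H1 H2 0 hpos
  have hc0 : fcChain lst (fcStep lst 0) k = 0 := by
    have := (H1 k hk).1
    omega
  by_cases hke : k = lst.length - 1
  · rw [← hke]; exact hc0
  · exfalso
    have hk1 : k + 1 < lst.length := by omega
    have hstep : fcChain lst (fcStep lst 0) (k + 1) = fcChain lst (fcStep lst 0) 0 := by
      show fcStep lst (fcChain lst (fcStep lst 0) k) = fcChain lst (fcStep lst 0) 0
      rw [hc0]
      rfl
    exact H2 0 (k + 1) (by omega) hk1 hstep.symm

theorem walk_complete (lst : List Int)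
    (hzero : fcChain lst (fcStep lst 0) (lst.length - 1) = 0)
    (hnz : ∀ t, t < lst.length - 1 → fcChain lst (fcStep lst 0) t ≠ 0) :
    ∀ r k, k + r = lst.length → k < lst.length →
      fcWalk lst (fcChain lst (fcStep lst 0) k) (k + 1) r = lst.length := by
  intro r
  induction r with
  | zero => intro k h1 h2; omega
  | succ r ih =>
    intro k h1 h2
    rw [fcWalk]
    by_cases hke : k = lst.length - 1
    · have h0 : (fcChain lst (fcStep lst 0) k == 0) = true := by
        rw [beq_iff_eq, hke]
        exact hzero
      rw [h0, if_pos rfl]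
      omega
    · have h0 : (fcChain lst (fcStep lst 0) k == 0) = false := by
        rw [beq_eq_false_iff_ne]
        exact hnz k (by omega)
      rw [h0, if_neg (by simp)]
      exact ih (k + 1) (by omega) (by omega)

theorem dirAB (lst : List Int) (hpos : 0 < lst.length)
    (H1 : ∀ k, k < lst.length → fcInR lst (fcChain lst (fcStep lst 0) k))
    (H2 : ∀ j k, j < k → k < lst.length →
      fcChain lst (fcStep lst 0) j ≠ fcChain lst (fcStep lst 0) k) :
    (lst.Nodup ∧ ∀ x ∈ lst, 0 ≤ x ∧ x < (lst.length : Int)) ∧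
      fcWalk lst (fcStep lst 0) 1 lst.length = lst.length := by
  have hzero := dirAB_zero lst hpos H1 H2
  have hnz : ∀ t, t < lst.length - 1 → fcChain lst (fcStep lst 0) t ≠ 0 := by
    intro t ht he
    exact H2 t (lst.length - 1) (by omega) (by omega) (he.trans hzero.symm)
  have hwrap : fcChain lst (fcStep lst 0) lst.length = fcChain lst (fcStep lst 0) 0 := by
    have : lst.length = (lst.length - 1) + 1 := by omega
    rw [this]
    show fcStep lst (fcChain lst (fcStep lst 0) (lst.length - 1)) = _
    rw [hzero]
    rfl
  have hstep : ∀ k, k < lst.length →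
      lst.getD (fcChain lst (fcStep lst 0) k).toNat 0 = fcChain lst (fcStep lst 0) (k + 1) := by
    intro k hk
    rw [show fcChain lst (fcStep lst 0) (k + 1) = fcStep lst (fcChain lst (fcStep lst 0) k) from rfl,
      fcStep_eq lst _ (H1 k hk)]
  -- every element of lst is a chain value
  have hmem : ∀ i, i < lst.length → ∃ m, m < lst.length ∧
      lst.getD i 0 = fcChain lst (fcStep lst 0) m := by
    intro i hi
    obtain ⟨k, hk, hki⟩ := dirAB_surj lst H1 H2 i hi
    rcases lt_or_ge (k + 1) lst.length with hlt | hge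
    · exact ⟨k + 1, hlt, by rw [← hki, hstep k hk]⟩
    · have hke : k = lst.length - 1 := by omega
      refine ⟨0, hpos, ?_⟩
      rw [← hki, hstep k hk, hke]
      have : (lst.length - 1) + 1 = lst.length := by omega
      rw [this, hwrap]
  refine ⟨⟨?_, ?_⟩, ?_⟩
  · -- Nodup
    rw [List.nodup_iff_injective_get]
    intro a b hab
    obtain ⟨k, hk, hki⟩ := dirAB_surj lst H1 H2 a.1 a.2
    obtain ⟨k', hk', hki'⟩ := dirAB_surj lst H1 H2 b.1 b.2
    have hga : lst.get a = lst.getD a.1 0 := by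
      rw [List.getD_eq_getElem _ _ a.2]
      rfl
    have hgb : lst.get b = lst.getD b.1 0 := by
      rw [List.getD_eq_getElem _ _ b.2]
      rfl
    have hval : lst.getD a.1 0 = lst.getD b.1 0 := by rw [← hga, ← hgb, hab]
    rw [← hki, ← hki'] at hval
    rw [hstep k hk, hstep k' hk'] at hval
    have hkk : k = k' := by
      rcases lt_or_ge (k + 1) lst.length with h1 | h1 <;>
        rcases lt_or_ge (k' + 1) lst.length with h2 | h2
      · exact Nat.succ_injective (chain_inj_of_pairwise lst _ H2 _ _ h1 h2 hval)
      · exfalso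
        have hke : k' = lst.length - 1 := by omega
        rw [hke, show (lst.length - 1) + 1 = lst.length from by omega, hwrap] at hval
        have := chain_inj_of_pairwise lst _ H2 (k + 1) 0 h1 hpos hval
        omega
      · exfalso
        have hke : k = lst.length - 1 := by omega
        rw [hke, show (lst.length - 1) + 1 = lst.length from by omega, hwrap] at hval
        have := chain_inj_of_pairwise lst _ H2 0 (k' + 1) hpos h2 hval
        omega
      · omega
    apply Fin.ext
    rw [← hki, ← hki', hkk]
  · -- all in range
    intro x hx
    obtain ⟨i, hi, hxi⟩ := List.mem_iff_getElem.mp hx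
    obtain ⟨m, hm, hgm⟩ := hmem i hi
    rw [List.getD_eq_getElem _ _ hi] at hgm
    have := H1 m hm
    rw [← hgm] at this
    rw [← hxi]
    exact this
  · -- the walk
    have := walk_complete lst hzero hnz lst.length 0 (by omega) hpos
    exact this

-- ===== B ⇒ A =====
theorem dirBA_chain_inR (lst : List Int)
    (Hin : ∀ x ∈ lst, 0 ≤ x ∧ x < (lst.length : Int)) :
    ∀ (j : Int), fcInR lst j → ∀ k, fcInR lst (fcChain lst j k) := by
  intro j hj k
  induction k with
  | zero => exact hj
  | succ k ih =>
    show fcInR lst (fcStep lst (fcChain lst j k))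
    rw [fcStep_eq lst _ ih]
    have hlt : (fcChain lst j k).toNat < lst.length := by
      obtain ⟨h1, h2⟩ := ih
      omega
    rw [List.getD_eq_getElem _ _ hlt]
    exact Hin _ (List.getElem_mem hlt)

theorem dirBA_step_inj (lst : List Int) (Hnd : lst.Nodup) :
    ∀ (a b : Int), fcInR lst a → fcInR lst b → fcStep lst a = fcStep lst b → a = b := by
  intro a b ha hb he
  rw [fcStep_eq lst _ ha, fcStep_eq lst _ hb] at he
  have hal : a.toNat < lst.length := by obtain ⟨h1, h2⟩ := ha; omega
  have hbl : b.toNat < lst.length := by obtain ⟨h1, h2⟩ := hb; omega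
  rw [List.getD_eq_getElem _ _ hal, List.getD_eq_getElem _ _ hbl] at he
  have hinj := List.nodup_iff_injective_get.mp Hnd
  have hfin : (⟨a.toNat, hal⟩ : Fin lst.length) = ⟨b.toNat, hbl⟩ := hinj he
  have hvv : a.toNat = b.toNat := congrArg Fin.val hfin
  obtain ⟨h1, -⟩ := ha
  obtain ⟨h2, -⟩ := hb
  omega

theorem dirBA_walk (lst : List Int) (hpos : 0 < lst.length) :
    ∀ r k, k + r = lst.length → (∀ t, t < k → fcChain lst (fcStep lst 0) t ≠ 0) →
      fcWalk lst (fcChain lst (fcStep lst 0) k) (k + 1) r = lst.length →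
      fcChain lst (fcStep lst 0) (lst.length - 1) = 0 ∧
        ∀ t, t < lst.length - 1 → fcChain lst (fcStep lst 0) t ≠ 0 := by
  intro r
  induction r with
  | zero =>
    intro k h1 _ hw
    rw [fcWalk] at hw
    omega
  | succ r ih =>
    intro k h1 hpre hw
    rw [fcWalk] at hw
    by_cases h0 : fcChain lst (fcStep lst 0) k = 0
    · rw [beq_iff_eq.mpr h0, if_pos rfl] at hw
      have hke : k = lst.length - 1 := by omega
      exact ⟨hke ▸ h0, fun t ht => hpre t (by omega)⟩
    · rw [beq_eq_false_iff_ne.mpr h0, if_neg (by simp)] at hw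
      exact ih (k + 1) (by omega)
        (fun t ht => by
          rcases Nat.lt_succ_iff_lt_or_eq.mp ht with h | h
          · exact hpre t h
          · exact h ▸ h0) hw

theorem dirBA_back (lst : List Int) (hpos : 0 < lst.length) (Hnd : lst.Nodup)
    (Hin : ∀ x ∈ lst, 0 ≤ x ∧ x < (lst.length : Int)) :
    ∀ s a b, fcChain lst 0 (a + s) = fcChain lst 0 (b + s) → fcChain lst 0 a = fcChain lst 0 b := by
  have h0 : fcInR lst 0 := ⟨le_refl 0, by omega⟩
  intro s
  induction s with
  | zero => intro a b h; exact h
  | succ s ih =>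
    intro a b h
    have ha : fcInR lst (fcChain lst 0 (a + s)) := dirBA_chain_inR lst Hin 0 h0 (a + s)
    have hb : fcInR lst (fcChain lst 0 (b + s)) := dirBA_chain_inR lst Hin 0 h0 (b + s)
    exact ih a b (dirBA_step_inj lst Hnd _ _ ha hb h)

theorem dirBA (lst : List Int) (hpos : 0 < lst.length) (Hnd : lst.Nodup)
    (Hin : ∀ x ∈ lst, 0 ≤ x ∧ x < (lst.length : Int))
    (Hw : fcWalk lst (fcStep lst 0) 1 lst.length = lst.length) :
    ∀ k, k < lst.length → fcInR lst (fcChain lst (fcStep lst 0) k) ∧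
      ∀ j, j < k → fcChain lst (fcStep lst 0) j ≠ fcChain lst (fcStep lst 0) k := by
  have h0 : fcInR lst 0 := ⟨le_refl 0, by omega⟩
  have hD : ∀ t, fcChain lst 0 (t + 1) = fcChain lst (fcStep lst 0) t :=
    fun t => fcChain_succ_front lst 0 t
  obtain ⟨hz, hnz⟩ := dirBA_walk lst hpos lst.length 0 (by omega) (by omega) Hw
  intro k hk
  refine ⟨?_, ?_⟩
  · rw [← hD]
    exact dirBA_chain_inR lst Hin 0 h0 (k + 1)
  · intro j hj he
    rw [← hD, ← hD] at he
    have hs : j + 1 + (0 : Nat) = j + 1 := rfl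
    have hab : fcChain lst 0 (0 + (j + 1)) = fcChain lst 0 ((k - j) + (j + 1)) := by
      rw [show 0 + (j + 1) = j + 1 from by omega, show (k - j) + (j + 1) = k + 1 from by omega]
      exact he
    have hback := dirBA_back lst hpos Hnd Hin (j + 1) 0 (k - j) hab
    have hkj : fcChain lst 0 (k - j) = 0 := by
      rw [← hback]
      rfl
    have hkj1 : k - j = (k - j - 1) + 1 := by omega
    rw [hkj1, hD] at hkj
    exact hnz (k - j - 1) (by omega) hkj

-- ===== VERDICT (by name: the statement is the Claim_ definition above) =====
theorem full_cycle_spec : Claim_equal_full_cycle := by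
  intro lst _ hpre
  show full_cycle lst = full_cycle_alt lst
  have hpos : 0 < lst.length := List.length_pos_iff.mpr hpre
  rw [Bool.eq_iff_iff, A_iff lst hpre, B_iff lst hpre]
  constructor
  · intro hA
    have hspec := ACov_spec lst lst.length _ _ hA
    exact dirAB lst hpos
      (fun k hk => (hspec k hk).1)
      (fun j k hj hk => ((hspec k hk).2.2 j hj))
  · rintro ⟨⟨hnd, hall⟩, hw⟩
    apply ACov_intro
    intro k hk
    obtain ⟨hin, hne⟩ := dirBA lst hpos hnd hall hw k hk
    refine ⟨hin, ?_, hne⟩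
    apply getD_replicate_true
    obtain ⟨h1, h2⟩ := hin
    omega
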